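-- pv_equiv track=rewrite | github.com/JAGR1792/parcial-lp | punto_3/ASD_Recursivo.py | primeros_secuencia
-- ===== SOURCE A (Python) =====
-- EPSILON = 'ε'
--
-- def primeros_secuencia(seq, PRIMEROS):
--     resultado = set()
--
--     for X in seq:
--         resultado |= (PRIMEROS[X] - {EPSILON})
--         if EPSILON not in PRIMEROS[X]:
--             return resultado
--
--     resultado.add(EPSILON)
--     return resultado
-- ===== SOURCE B (Python) =====
-- EPSILON = 'ε'
--
-- def primeros_secuencia(seq, PRIMEROS):
--     # Standard recursive definition of FIRST over a symbol string (head/tail).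
--     if not seq:
--         return {EPSILON}
--     f = PRIMEROS[seq[0]]
--     if EPSILON in f:
--         return (f - {EPSILON}) | primeros_secuencia(seq[1:], PRIMEROS)
--     return f - {EPSILON}
-- ===== Notes on version B (the rewrite author's own statement) =====
-- stated objective: alternative
-- what changed: Replaces the imperative loop that grows a mutable accumulator set with the textbook structural recursion on the sequence (head/tail): FIRST(eps)={ε}, FIRST(Xw)=FIRST(X)-{ε} unioned with FIRST(w) when ε∈FIRST(X); no accumulator is threaded.
import Mathlib
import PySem

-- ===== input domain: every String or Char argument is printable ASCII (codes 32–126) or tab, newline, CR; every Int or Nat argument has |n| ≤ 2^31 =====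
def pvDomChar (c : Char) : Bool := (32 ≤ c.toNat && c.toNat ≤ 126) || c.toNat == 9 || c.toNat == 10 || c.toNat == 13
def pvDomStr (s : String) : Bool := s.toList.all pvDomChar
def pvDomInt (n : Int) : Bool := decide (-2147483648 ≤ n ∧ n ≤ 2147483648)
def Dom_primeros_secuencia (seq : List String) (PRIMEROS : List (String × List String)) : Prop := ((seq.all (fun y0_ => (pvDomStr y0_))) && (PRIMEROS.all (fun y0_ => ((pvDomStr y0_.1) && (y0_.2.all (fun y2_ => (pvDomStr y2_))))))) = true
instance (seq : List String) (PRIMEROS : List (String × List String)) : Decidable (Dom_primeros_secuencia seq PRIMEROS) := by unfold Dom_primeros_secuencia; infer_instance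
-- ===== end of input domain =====

-- B replaces A's imperative loop over a mutable accumulator set by the textbook
-- head/tail structural recursion for FIRST of a symbol string; same cost, no accumulator.

def pvEps : String := "ε"

-- first-match association-list lookup: the port of 'PRIMEROS[X]' / 'X in PRIMEROS' on the assoc-list encoding of the dict
def pvLookup? (d : List (String × List String)) (k : String) : Option (List String) :=
  match d with
  | [] => none
  | (k', v) :: rest => if k' = k then some v else pvLookup? rest k

-- ===== PORT A =====
-- the for-loop of A: state = (remaining seq, resultado); early return when ε ∉ PRIMEROS[X]
def pvLoopA (PRIMEROS : List (String × List String)) : List String → PySem.Set String → List String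
  | [], res => PySem.Set.add res pvEps
  | X :: rest, res =>
      let fX := (pvLookup? PRIMEROS X).getD []   -- PRIMEROS[X]; Pre_ guarantees the key is present where the loop reaches it
      let res' := PySem.Set.union res (PySem.Set.diff fX [pvEps])
      if pvEps ∉ fX then res' else pvLoopA PRIMEROS rest res'

def primeros_secuencia (seq : List String) (PRIMEROS : List (String × List String)) : List String :=
  pvLoopA PRIMEROS seq PySem.Set.empty

-- ===== PORT B =====
def primeros_secuencia_alt (seq : List String) (PRIMEROS : List (String × List String)) : List String :=
  match seq with
  | [] => [pvEps]
  | X :: rest =>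
      let f := (pvLookup? PRIMEROS X).getD []
      if pvEps ∈ f then
        PySem.Set.union (PySem.Set.diff f [pvEps]) (primeros_secuencia_alt rest PRIMEROS)
      else
        PySem.Set.diff f [pvEps]

-- ===== PRECONDITION & SPEC =====
-- Pre_ excludes exactly (a) dict values that are not duplicate-free lists (Python dict values here
-- are sets, so their encoding is duplicate-free) and (b) inputs where A raises KeyError: some symbol
-- actually reached by the scan (all earlier symbols are keys whose FIRST set contains ε) is not a key.
def Pre_primeros_secuencia (seq : List String) (PRIMEROS : List (String × List String)) : Prop :=
  (∀ p ∈ PRIMEROS, p.2.Nodup) ∧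
  ∀ i : Fin seq.length,
    (∀ j : Fin seq.length, j.val < i.val → ∃ p ∈ PRIMEROS, p.1 = seq.get j ∧ pvEps ∈ p.2) →
    seq.get i ∈ PRIMEROS.map Prod.fst

instance (seq : List String) (PRIMEROS : List (String × List String)) : Decidable (Pre_primeros_secuencia seq PRIMEROS) := by unfold Pre_primeros_secuencia; infer_instance

def pvWitness_primeros_secuencia : List String × (List (String × List String)) :=
  (["a"], [("a", ["x"])])

def Spec_primeros_secuencia (seq : List String) (PRIMEROS : List (String × List String)) (out : List String) : Prop := out = primeros_secuencia_alt seq PRIMEROS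
instance (seq : List String) (PRIMEROS : List (String × List String)) (out : List String) : Decidable (Spec_primeros_secuencia seq PRIMEROS out) := by unfold Spec_primeros_secuencia; infer_instance

-- ===== CLAIM (what is proved, stated in full; the proofs are below) =====
def Claim_equal_primeros_secuencia : Prop := ∀ (seq : List String) (PRIMEROS : List (String × List String)), Dom_primeros_secuencia seq PRIMEROS → Pre_primeros_secuencia seq PRIMEROS → Spec_primeros_secuencia seq PRIMEROS (primeros_secuencia seq PRIMEROS)

-- ===== LEMMAS AND PROOFS =====

theorem pv_union_eq_update (s t : List String) : PySem.Set.union s t = PySem.Set.update s t := rfl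

theorem pv_update_add (r a : List String) (x : String) :
    PySem.Set.update r (PySem.Set.add a x) = PySem.Set.add (PySem.Set.update r a) x := by
  by_cases hx : x ∈ a
  · rw [PySem.Set.add_of_mem hx, PySem.Set.add_of_mem (by simp [PySem.Set.mem_update, hx])]
  · rw [PySem.Set.add_of_not_mem hx, PySem.Set.update_append, PySem.Set.update_cons, PySem.Set.update_nil]

theorem pv_update_update (r : List String) (b a : List String) :
    PySem.Set.update r (PySem.Set.update a b) = PySem.Set.update (PySem.Set.update r a) b := by
  induction b generalizing a with
  | nil => simp [PySem.Set.update_nil]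
  | cons y b' ih =>
      rw [PySem.Set.update_cons, ih, pv_update_add, PySem.Set.update_cons]

theorem pv_nodup_getD (PRIMEROS : List (String × List String)) (X : String)
    (h : ∀ p ∈ PRIMEROS, p.2.Nodup) : ((pvLookup? PRIMEROS X).getD []).Nodup := by
  induction PRIMEROS with
  | nil => simp [pvLookup?]
  | cons p rest ih =>
      obtain ⟨k', v⟩ := p
      rw [pvLookup?]
      split
      · exact h (k', v) (by simp)
      · exact ih (fun q hq => h q (by simp [hq]))

theorem pv_nodup_alt (seq : List String) (PRIMEROS : List (String × List String))
    (h : ∀ p ∈ PRIMEROS, p.2.Nodup) : (primeros_secuencia_alt seq PRIMEROS).Nodup := by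
  induction seq with
  | nil => simp [primeros_secuencia_alt, pvEps]
  | cons X rest ih =>
      rw [primeros_secuencia_alt]
      have hf := PySem.Set.nodup_diff (t := [pvEps]) (h := pv_nodup_getD PRIMEROS X h)
      split
      · rw [pv_union_eq_update]
        exact PySem.Set.nodup_update _ _ hf
      · exact hf

theorem pv_loopA_eq (PRIMEROS : List (String × List String)) (seq : List String) (res : List String) :
    pvLoopA PRIMEROS seq res = PySem.Set.update res (primeros_secuencia_alt seq PRIMEROS) := by
  induction seq generalizing res with
  | nil =>
      rw [pvLoopA, primeros_secuencia_alt, PySem.Set.update_cons, PySem.Set.update_nil]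
  | cons X rest ih =>
      simp only [pvLoopA, primeros_secuencia_alt]
      by_cases hε : pvEps ∈ (pvLookup? PRIMEROS X).getD []
      · rw [if_neg (not_not_intro hε), if_pos hε, ih, pv_union_eq_update, pv_union_eq_update,
          ← pv_update_update]
      · rw [if_pos hε, if_neg hε, pv_union_eq_update]

-- ===== VERDICT (by name: the statement is the Claim_ definition above) =====
theorem primeros_secuencia_spec : Claim_equal_primeros_secuencia := by
  intro seq PRIMEROS _ hpre
  unfold Spec_primeros_secuencia primeros_secuencia
  rw [pv_loopA_eq]
  show PySem.Set.update [] _ = _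
  rw [PySem.Set.update_nil_left]
  exact PySem.Set.ofList_eq_self_of_nodup (h := pv_nodup_alt seq PRIMEROS hpre.1)
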